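-- pv_equiv track=rewrite | github.com/igortru/pylddt | src/msn.py | calc_col2pos
-- ===== SOURCE A (Python) =====
-- def calc_col2pos(row):
-- 	col2pos = []
-- 	pos2col = []
-- 	pos = 0
-- 	col = 0
-- 	for c in row:
-- 		if c == '-' or c == '.':
-- 			col2pos.append(None)
-- 		else:
-- 			col2pos.append(pos)
-- 			pos2col.append(col)
-- 			pos += 1
-- 		col += 1
-- 	return col2pos,pos2col
-- ===== SOURCE B (Python) =====
-- def calc_col2pos(row):
--     pos2col = [i for i, c in enumerate(row) if c != '-' and c != '.']
--     col2pos = [None] * len(row)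
--     for p, col in enumerate(pos2col):
--         col2pos[col] = p
--     return col2pos, pos2col
-- ===== Notes on version B (the rewrite author's own statement) =====
-- stated objective: alternative
-- what changed: Replaces A's single interleaved loop with two running counters by two separately-shaped passes: pos2col as a comprehension over enumerate collecting non-gap column indices, then col2pos allocated as [None]*len(row) and filled in place from enumerate(pos2col).
import Mathlib
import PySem

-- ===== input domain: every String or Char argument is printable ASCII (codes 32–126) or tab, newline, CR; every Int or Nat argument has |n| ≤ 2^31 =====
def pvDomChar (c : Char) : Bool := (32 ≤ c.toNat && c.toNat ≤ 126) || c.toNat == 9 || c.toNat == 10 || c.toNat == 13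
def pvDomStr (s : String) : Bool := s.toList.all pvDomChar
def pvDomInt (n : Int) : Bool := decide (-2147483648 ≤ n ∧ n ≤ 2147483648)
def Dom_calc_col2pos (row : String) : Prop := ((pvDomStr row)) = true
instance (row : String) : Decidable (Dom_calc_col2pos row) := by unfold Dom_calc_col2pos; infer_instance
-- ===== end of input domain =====

-- B rebuilds the same outputs by two separate passes (a filtered-enumerate comprehension for
-- pos2col, then an allocate-and-fill pass for col2pos) instead of A's interleaved counter loop.

-- ===== PORT A =====
def calc_col2pos (row : String) : List (Option Int) × List Int :=
  -- state: (col2pos, pos2col, pos, col)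
  let st := row.toList.foldl
    (fun (st : List (Option Int) × List Int × Int × Int) c =>
      if c == '-' || c == '.' then
        (st.1 ++ [none], st.2.1, st.2.2.1, st.2.2.2 + 1)
      else
        (st.1 ++ [some st.2.2.1], st.2.1 ++ [st.2.2.2], st.2.2.1 + 1, st.2.2.2 + 1))
    ([], [], 0, 0)
  (st.1, st.2.1)

-- ===== PORT B =====
def calc_col2pos_alt (row : String) : List (Option Int) × List Int :=
  let pos2col : List Int :=
    ((PySem.List.enumerate row.toList).filter (fun q => q.2 != '-' && q.2 != '.')).map (·.1)
  -- col2pos = [None]*len(row); col2pos[col] = p  (the index is always in range, so the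
  -- item assignment is ported with pySetD, which equals Python's list assignment in range)
  let col2pos : List (Option Int) :=
    (PySem.List.enumerate pos2col).foldl
      (fun acc q => PySem.List.pySetD acc q.2 (some q.1))
      (List.replicate row.toList.length (none : Option Int))
  (col2pos, pos2col)

-- ===== PRECONDITION & SPEC =====
def Spec_calc_col2pos (row : String) (out : List (Option Int) × List Int) : Prop := out = calc_col2pos_alt row
instance (row : String) (out : List (Option Int) × List Int) : Decidable (Spec_calc_col2pos row out) := by unfold Spec_calc_col2pos; infer_instance

-- ===== CLAIM (what is proved, stated in full; the proofs are below) =====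
def Claim_equal_calc_col2pos : Prop := ∀ (row : String), Dom_calc_col2pos row → Spec_calc_col2pos row (calc_col2pos row)

-- ===== LEMMAS AND PROOFS =====

/-- gap test -/
def pvGap (c : Char) : Bool := c == '-' || c == '.'

/-- reference col2pos: rank counter `r` -/
def pvSpec1 : List Char → Nat → List (Option Int)
  | [], _ => []
  | c :: cs, r => if pvGap c then none :: pvSpec1 cs r else some (r : Int) :: pvSpec1 cs (r + 1)

/-- reference (rank, column) pairs of the non-gap characters, rank from `r`, column from `k` -/
def pvPr : List Char → Nat → Nat → List (Nat × Nat)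
  | [], _, _ => []
  | c :: cs, r, k => if pvGap c then pvPr cs r (k + 1) else (r, k) :: pvPr cs (r + 1) (k + 1)

theorem pvPr_shift (cs : List Char) (r k : Nat) :
    pvPr cs r (k + 1) = (pvPr cs r k).map (fun q => (q.1, q.2 + 1)) := by
  induction cs generalizing r k with
  | nil => rfl
  | cons c cs ih =>
    simp only [pvPr]
    by_cases h : pvGap c <;> simp [h, ih]

/-- A's loop computes pvSpec1 / the columns of pvPr. -/
theorem pvLoopA (cs : List Char) (a1 : List (Option Int)) (a2 : List Int) (r k : Nat) :
    (cs.foldl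
      (fun (st : List (Option Int) × List Int × Int × Int) c =>
        if c == '-' || c == '.' then
          (st.1 ++ [none], st.2.1, st.2.2.1, st.2.2.2 + 1)
        else
          (st.1 ++ [some st.2.2.1], st.2.1 ++ [st.2.2.2], st.2.2.1 + 1, st.2.2.2 + 1))
      (a1, a2, (r : Int), (k : Int))).1 = a1 ++ pvSpec1 cs r ∧
    (cs.foldl
      (fun (st : List (Option Int) × List Int × Int × Int) c =>
        if c == '-' || c == '.' then
          (st.1 ++ [none], st.2.1, st.2.2.1, st.2.2.2 + 1)
        else
          (st.1 ++ [some st.2.2.1], st.2.1 ++ [st.2.2.2], st.2.2.1 + 1, st.2.2.2 + 1))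
      (a1, a2, (r : Int), (k : Int))).2.1 = a2 ++ (pvPr cs r k).map (fun q => ((q.2 : Nat) : Int)) := by
  induction cs generalizing a1 a2 r k with
  | nil => simp [pvPr, pvSpec1]
  | cons c cs ih =>
    simp only [List.foldl_cons]
    by_cases h : pvGap c
    · have h' : (c == '-' || c == '.') = true := h
      simp only [h', pvSpec1, pvPr, h, if_pos]
      have : ((k : Int) + 1) = ((k + 1 : Nat) : Int) := by push_cast; ring
      rw [this]
      obtain ⟨h1, h2⟩ := ih (a1 ++ [none]) a2 r (k + 1)
      constructor
      · rw [h1]; simp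
      · rw [h2]
    · have h' : (c == '-' || c == '.') = false := by simpa [pvGap] using h
      simp only [h', Bool.false_eq_true, pvSpec1, pvPr, h, if_neg, Bool.false_eq_true,
        not_false_iff]
      have e1 : ((r : Int) + 1) = ((r + 1 : Nat) : Int) := by push_cast; ring
      have e2 : ((k : Int) + 1) = ((k + 1 : Nat) : Int) := by push_cast; ring
      rw [e1, e2]
      obtain ⟨h1, h2⟩ := ih (a1 ++ [some (r : Int)]) (a2 ++ [(k : Int)]) (r + 1) (k + 1)
      constructor
      · rw [h1]; simp
      · rw [h2]; simp

/-- B's first pass computes the columns of pvPr. -/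
theorem pvPass1 (cs : List Char) (k r : Nat) :
    ((PySem.List.enumerate cs (k : Int)).filter (fun q => q.2 != '-' && q.2 != '.')).map (·.1)
      = (pvPr cs r k).map (fun q => ((q.2 : Nat) : Int)) := by
  induction cs generalizing k r with
  | nil => simp [pvPr, PySem.List.enumerate_nil]
  | cons c cs ih =>
    rw [PySem.List.enumerate_cons]
    have e : ((k : Int) + 1) = ((k + 1 : Nat) : Int) := by push_cast; ring
    by_cases h : pvGap c
    · have h' : (c != '-' && c != '.') = false := by
        simp only [pvGap, Bool.or_eq_true, beq_iff_eq] at h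
        rcases h with h | h <;> simp [h]
      simp only [List.filter_cons, h', Bool.false_eq_true, if_false, pvPr, h, if_pos, e]
      exact ih (k + 1) r
    · have h' : (c != '-' && c != '.') = true := by
        simp only [pvGap, Bool.or_eq_true, beq_iff_eq] at h
        rw [not_or] at h
        simp [bne_iff_ne, h.1, h.2]
      simp only [List.filter_cons, h', pvPr, h, Bool.false_eq_true, if_false,
        List.map_cons, e]
      exact congrArg _ (ih (k + 1) (r + 1))

/-- enumerating the column list recovers the (rank, column) pairs, since ranks are consecutive. -/
theorem pvPass2 (cs : List Char) (r k : Nat) :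
    PySem.List.enumerate ((pvPr cs r k).map (fun q => ((q.2 : Nat) : Int))) (r : Int)
      = (pvPr cs r k).map (fun q => (((q.1 : Nat) : Int), ((q.2 : Nat) : Int))) := by
  induction cs generalizing r k with
  | nil => simp [pvPr, PySem.List.enumerate_nil]
  | cons c cs ih =>
    simp only [pvPr]
    by_cases h : pvGap c
    · simp only [h, if_pos]
      exact ih r (k + 1)
    · simp only [h, Bool.false_eq_true, if_false, List.map_cons, PySem.List.enumerate_cons]
      have e : ((r : Int) + 1) = ((r + 1 : Nat) : Int) := by push_cast; ring
      rw [e, ih (r + 1) (k + 1)]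

/-- shifting every column by one and folding set over a cons skips the head. -/
theorem pvSetCons (l : List (Nat × Nat)) (x : Option Int) (base : List (Option Int)) :
    ((l.map (fun q => (q.1, q.2 + 1))).foldl
        (fun acc q => acc.set q.2 (some (q.1 : Int))) (x :: base))
      = x :: l.foldl (fun acc q => acc.set q.2 (some (q.1 : Int))) base := by
  induction l generalizing x base with
  | nil => rfl
  | cons q l ih => simp only [List.map_cons, List.foldl_cons, List.set]; exact ih x _

/-- B's second pass computes pvSpec1. -/
theorem pvPass3 (cs : List Char) (r : Nat) :
    ((pvPr cs r 0).foldl (fun acc q => acc.set q.2 (some (q.1 : Int)))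
        (List.replicate cs.length (none : Option Int)))
      = pvSpec1 cs r := by
  induction cs generalizing r with
  | nil => rfl
  | cons c cs ih =>
    simp only [pvPr, pvSpec1, List.length_cons, List.replicate_succ]
    by_cases h : pvGap c
    · simp only [h, if_pos]
      rw [pvPr_shift, pvSetCons, ih r]
    · simp only [h, Bool.false_eq_true, if_false, List.foldl_cons, List.set]
      rw [pvPr_shift, pvSetCons, ih (r + 1)]

/-- folding over the Int pairs with pySetD equals folding over the Nat pairs with set. -/
theorem pvFoldBridge (l : List (Nat × Nat)) (base : List (Option Int)) :
    ((l.map (fun q => (((q.1 : Nat) : Int), ((q.2 : Nat) : Int)))).foldl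
        (fun acc q => PySem.List.pySetD acc q.2 (some q.1)) base)
      = l.foldl (fun acc q => acc.set q.2 (some (q.1 : Int))) base := by
  induction l generalizing base with
  | nil => rfl
  | cons q l ih =>
    simp only [List.map_cons, List.foldl_cons, PySem.List.pySetD_natCast]
    exact ih _

-- ===== VERDICT (by name: the statement is the Claim_ definition above) =====
theorem calc_col2pos_spec : Claim_equal_calc_col2pos := by
  intro row _
  unfold Spec_calc_col2pos calc_col2pos calc_col2pos_alt
  dsimp only
  obtain ⟨h1, h2⟩ := pvLoopA row.toList [] [] 0 0
  have p1 := pvPass1 row.toList 0 0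
  have p2 := pvPass2 row.toList 0 0
  simp only [Nat.cast_zero, List.nil_append] at h1 h2 p1 p2
  rw [h1, h2, p1, p2, pvFoldBridge, pvPass3]
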